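-- pv_equiv track=rewrite | github.com/CCSB-DFCI/TF_isoforms_paper | src/condensates/Fig5__Condensates_Analyses.py | cytosolic_loc
-- ===== SOURCE A (Python) =====
-- def cytosolic_loc(row, col):
--     cytosolic_locs_to_consider = ["Actin filaments", "Cleavage furrow", "Focal adhesion sites",
--                                   "Intermediate filaments", "Centriolar satellite", "Centrosome",
--                                   "Cytokinetic bridge", "Microtubule ends", "Microtubules",
--                                   "Midbody", "Midbody ring", "Mitotic spindle",
--                                   "Aggresome", "Cytoplasmic bodies", "Cytosol", "Rods & rings",
--                                   "Mitochondria", "Endoplasmic reticulum", "Vesicles",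
--                                   "Endosomes", "Lipid droplets", "Lysosomes", "Peroxisomes",
--                                   "Golgi apparatus", "Cell junctions", "Plasma membrane"]
--
--     for loc in cytosolic_locs_to_consider:
--         if loc in str(row[col]):
--             return True
--     return False
-- ===== SOURCE B (Python) =====
-- CYTOSOLIC_LOCS = ["Actin filaments", "Cleavage furrow", "Focal adhesion sites",
--                   "Intermediate filaments", "Centriolar satellite", "Centrosome",
--                   "Cytokinetic bridge", "Microtubule ends", "Microtubules",
--                   "Midbody", "Midbody ring", "Mitotic spindle",
--                   "Aggresome", "Cytoplasmic bodies", "Cytosol", "Rods & rings",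
--                   "Mitochondria", "Endoplasmic reticulum", "Vesicles",
--                   "Endosomes", "Lipid droplets", "Lysosomes", "Peroxisomes",
--                   "Golgi apparatus", "Cell junctions", "Plasma membrane"]
--
--
-- def cytosolic_loc(row, col):
--     # single left-to-right scan over the cell text: at each position test
--     # whether any of the fixed location names starts there
--     s = str(row[col])
--     return any(any(s.startswith(loc, i) for loc in CYTOSOLIC_LOCS)
--                for i in range(len(s) + 1))
-- ===== Notes on version B (the rewrite author's own statement) =====
-- stated objective: alternative
-- what changed: Replaces the per-location-name substring search (one 'loc in s' scan per name) with a single position-major scan of the cell text, testing at each position whether any fixed location name starts there (any/any over startswith with offset).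
import Mathlib
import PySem

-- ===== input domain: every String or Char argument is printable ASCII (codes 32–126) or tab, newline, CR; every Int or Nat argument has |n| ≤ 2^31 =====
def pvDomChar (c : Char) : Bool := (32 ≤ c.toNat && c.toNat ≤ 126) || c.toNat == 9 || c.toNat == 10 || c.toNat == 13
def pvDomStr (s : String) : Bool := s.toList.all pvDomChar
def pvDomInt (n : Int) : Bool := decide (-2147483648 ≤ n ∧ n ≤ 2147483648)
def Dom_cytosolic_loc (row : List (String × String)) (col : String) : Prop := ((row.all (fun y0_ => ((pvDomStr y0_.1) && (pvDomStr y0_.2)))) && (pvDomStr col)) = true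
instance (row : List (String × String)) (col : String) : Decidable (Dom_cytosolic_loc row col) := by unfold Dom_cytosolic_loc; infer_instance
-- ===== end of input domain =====

-- B is an alternative implementation: a single position-major scan of the cell text
-- (prefix test per position) instead of A's per-location-name substring searches.
-- A raises KeyError when col is not a key of row; Pre_ excludes exactly those inputs.

-- the fixed list of location names (shared constant of both Python versions)
def cytoLocs : List String :=
  ["Actin filaments", "Cleavage furrow", "Focal adhesion sites",
   "Intermediate filaments", "Centriolar satellite", "Centrosome",
   "Cytokinetic bridge", "Microtubule ends", "Microtubules",
   "Midbody", "Midbody ring", "Mitotic spindle",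
   "Aggresome", "Cytoplasmic bodies", "Cytosol", "Rods & rings",
   "Mitochondria", "Endoplasmic reticulum", "Vesicles",
   "Endosomes", "Lipid droplets", "Lysosomes", "Peroxisomes",
   "Golgi apparatus", "Cell junctions", "Plasma membrane"]

-- ===== PORT A =====
-- A's for-loop with early return: per location name, a substring test 'loc in s'
def cytoLoopA (s : String) : List String → Bool
  | [] => false
  | loc :: rest => if PySem.Str.isIn loc s then true else cytoLoopA s rest

def cytosolic_loc (row : List (String × String)) (col : String) : Bool :=
  match (PySem.Dict.mk row).get? col with
  | some v => cytoLoopA v cytoLocs          -- str(row[col]) on a str value is the value itself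
  | none => false                           -- unreachable under Pre_ (Python raises KeyError)

-- ===== PORT B =====
-- B: one scan over positions 0..len(s); at each, does any name start there? (s.startswith(loc, i))
def cytoHitAt (s : List Char) (i : Nat) : Bool :=
  cytoLocs.any (fun loc => loc.toList.isPrefixOf (s.drop i))

def cytosolic_loc_alt (row : List (String × String)) (col : String) : Bool :=
  match (PySem.Dict.mk row).get? col with
  | some v => (List.range (v.toList.length + 1)).any (fun i => cytoHitAt v.toList i)
  | none => false

-- ===== PRECONDITION & SPEC =====
-- Pre_ excludes exactly the inputs where Python A raises KeyError (col not a key of row).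
def Pre_cytosolic_loc (row : List (String × String)) (col : String) : Prop :=
  (PySem.Dict.mk row).contains col = true
instance (row : List (String × String)) (col : String) : Decidable (Pre_cytosolic_loc row col) := by unfold Pre_cytosolic_loc; infer_instance

def pvWitness_cytosolic_loc : (List (String × String)) × String := ([("loc", "Cytosol; Nucleoplasm")], "loc")

def Spec_cytosolic_loc (row : List (String × String)) (col : String) (out : Bool) : Prop := out = cytosolic_loc_alt row col
instance (row : List (String × String)) (col : String) (out : Bool) : Decidable (Spec_cytosolic_loc row col out) := by unfold Spec_cytosolic_loc; infer_instance

-- ===== CLAIM (what is proved, stated in full; the proofs are below) =====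
def Claim_equal_cytosolic_loc : Prop := ∀ (row : List (String × String)) (col : String), Dom_cytosolic_loc row col → Pre_cytosolic_loc row col → Spec_cytosolic_loc row col (cytosolic_loc row col)

-- ===== LEMMAS AND PROOFS =====

lemma cytoLoopA_eq_any (s : String) (L : List String) :
    cytoLoopA s L = L.any (fun loc => PySem.Str.isIn loc s) := by
  induction L with
  | nil => rfl
  | cons loc rest ih => cases h : PySem.Str.isIn loc s <;> rw [cytoLoopA] <;> simp [ih]

lemma core (s : String) :
    cytoLoopA s cytoLocs = (List.range (s.toList.length + 1)).any (fun i => cytoHitAt s.toList i) := by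
  rw [cytoLoopA_eq_any]
  rcases h : (List.range (s.toList.length + 1)).any (fun i => cytoHitAt s.toList i) with _ | _
  · -- B says false: no name is a prefix at any position ⇒ no name is a substring
    simp only [List.any_eq_false, cytoHitAt, List.mem_range] at h
    simp only [List.any_eq_false]
    intro loc hloc
    rw [Bool.not_eq_true, PySem.Str.isIn_eq, PySem.Chars.isIn_eq_false_iff]
    intro hinf
    have : ∃ j, loc.toList <+: s.toList.drop j :=
      (PySem.Chars.exists_prefix_drop_iff_isIn _ _).mpr
        ((PySem.Chars.isIn_iff_infix _ _).mpr hinf)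
    obtain ⟨j, hj⟩ := this
    by_cases hjl : j ≤ s.toList.length
    · have h2 := h j (by omega)
      rw [Bool.not_eq_true, List.any_eq_false] at h2
      exact absurd (List.isPrefixOf_iff_prefix.mpr hj) (by simpa using h2 loc hloc)
    · have hd : s.toList.drop j = s.toList.drop s.toList.length := by
        rw [List.drop_eq_nil_of_le (by omega), List.drop_eq_nil_of_le le_rfl]
      rw [hd] at hj
      have h2 := h s.toList.length (by omega)
      rw [Bool.not_eq_true, List.any_eq_false] at h2
      exact absurd (List.isPrefixOf_iff_prefix.mpr hj) (by simpa using h2 loc hloc)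
  · -- B says true: some name is a prefix at some position ⇒ it is a substring
    simp only [List.any_eq_true, cytoHitAt, List.mem_range] at h
    obtain ⟨i, _, loc, hloc, hpre⟩ := h
    simp only [List.any_eq_true]
    refine ⟨loc, hloc, ?_⟩
    rw [PySem.Str.isIn_eq]
    exact (PySem.Chars.exists_prefix_drop_iff_isIn _ _).mp
      ⟨i, List.isPrefixOf_iff_prefix.mp hpre⟩

-- ===== VERDICT (by name: the statement is the Claim_ definition above) =====
theorem cytosolic_loc_spec : Claim_equal_cytosolic_loc := by
  intro row col _ _
  unfold Spec_cytosolic_loc cytosolic_loc cytosolic_loc_alt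
  cases h : (PySem.Dict.mk row).get? col with
  | none => rfl
  | some v => exact core v
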